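-- pv_equiv track=rewrite | github.com/Shadow-Operator/Project-Manager | api/_shared.py | find_all_descendants
-- ===== SOURCE A (Python) =====
-- def find_all_descendants(all_tasks, root_task_id):
--     """Given flat task list, find all descendant task_ids recursively."""
--     children_map = {}
--     for t in all_tasks:
--         parent = t.get("parent_task_id", "").strip()
--         if parent:
--             children_map.setdefault(parent, []).append(t["task_id"].strip())
--
--     descendants = []
--     queue = [root_task_id]
--     while queue:
--         current = queue.pop(0)
--         kids = children_map.get(current, [])
--         descendants.extend(kids)
--         queue.extend(kids)
--     return descendants
-- ===== SOURCE B (Python) =====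
-- def find_all_descendants(all_tasks, root_task_id):
--     """Given flat task list, find all descendant task_ids recursively."""
--     descendants = []
--     frontier = [root_task_id]
--     while frontier:
--         frontier = [t["task_id"].strip()
--                     for cur in frontier
--                     for t in all_tasks
--                     if t.get("parent_task_id", "").strip()
--                     and t.get("parent_task_id", "").strip() == cur]
--         descendants += frontier
--     return descendants
-- ===== Notes on version B (the rewrite author's own statement) =====
-- stated objective: alternative
-- what changed: B drops both the prebuilt children_map and the one-at-a-time pop(0) queue: it runs a level-synchronous BFS, computing each whole next frontier with a single comprehension that rescans all_tasks, which preserves A's output order (per dequeued node in level order, children in all_tasks order).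
import Mathlib
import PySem

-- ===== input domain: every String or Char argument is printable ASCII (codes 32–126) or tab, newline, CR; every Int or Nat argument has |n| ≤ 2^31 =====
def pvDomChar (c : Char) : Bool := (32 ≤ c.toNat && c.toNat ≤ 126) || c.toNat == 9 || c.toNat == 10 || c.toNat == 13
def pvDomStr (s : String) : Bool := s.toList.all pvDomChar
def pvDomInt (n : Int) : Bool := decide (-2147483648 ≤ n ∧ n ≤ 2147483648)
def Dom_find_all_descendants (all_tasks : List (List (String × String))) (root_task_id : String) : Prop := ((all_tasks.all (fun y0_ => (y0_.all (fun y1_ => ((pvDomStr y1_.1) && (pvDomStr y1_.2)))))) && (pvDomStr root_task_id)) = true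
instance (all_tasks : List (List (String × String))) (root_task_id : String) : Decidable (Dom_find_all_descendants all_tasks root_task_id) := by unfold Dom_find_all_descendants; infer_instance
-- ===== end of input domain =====

-- B replaces A's children_map + pop(0) queue by a level-synchronous BFS that recomputes each
-- whole frontier with a direct rescan of all_tasks; equality of the RETURN value is proved on Pre_.

-- ===== PORT A =====
-- t.get("parent_task_id", "").strip()
def pvParent (t : List (String × String)) : String :=
  PySem.Str.strip ((PySem.Dict.mk t).getD "parent_task_id" "")

-- t["task_id"].strip(); .get? = none is Python's KeyError, excluded by Pre_ (the "" default is never used there)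
def pvKid (t : List (String × String)) : String :=
  PySem.Str.strip (((PySem.Dict.mk t).get? "task_id").getD "")

-- children_map built by setdefault(parent, []).append(kid)  (= d[parent] = d.get(parent, []) + [kid])
def pvBuildMap (all_tasks : List (List (String × String))) : PySem.Dict String (List String) :=
  all_tasks.foldl
    (fun m t => if pvParent t != "" then m.modify (pvParent t) [] (· ++ [pvKid t]) else m)
    PySem.Dict.empty

-- the while-queue loop of A (one fuel unit per dequeued element; fuel is only a totality device,
-- Pre_'s no-reachable-cycle condition is what keeps the Python loop itself finite)
def pvLoopA (fuel : Nat) (m : PySem.Dict String (List String)) (descendants queue : List String) : List String :=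
  match fuel, queue with
  | 0, _ => descendants
  | _ + 1, [] => descendants
  | fuel + 1, current :: rest =>
      let kids := m.getD current []
      pvLoopA fuel m (descendants ++ kids) (rest ++ kids)

-- total fuel for N BFS levels starting from q: the exact number of dequeues A performs there
def pvFuelA (m : PySem.Dict String (List String)) (q : List String) : Nat → Nat
  | 0 => 0
  | N + 1 => q.length + pvFuelA m (q.flatMap (fun c => m.getD c [])) N

def find_all_descendants (all_tasks : List (List (String × String))) (root_task_id : String) : List String :=
  pvLoopA (pvFuelA (pvBuildMap all_tasks) [root_task_id] (all_tasks.length + 3))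
    (pvBuildMap all_tasks) [] [root_task_id]

-- ===== PORT B =====
-- the inner part of Source B's comprehension: tasks whose non-empty stripped parent equals cur
def pvChildren (all_tasks : List (List (String × String))) (cur : String) : List String :=
  (all_tasks.filter (fun t => (pvParent t != "") && (pvParent t == cur))).map pvKid

-- Source B's while loop: one fuel unit per LEVEL (again only a totality device)
def pvLoopB (fuel : Nat) (all_tasks : List (List (String × String)))
    (descendants frontier : List String) : List String :=
  match fuel, frontier with
  | 0, _ => descendants
  | _ + 1, [] => descendants
  | fuel + 1, c :: rest =>
      let next := (c :: rest).flatMap (pvChildren all_tasks)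
      pvLoopB fuel all_tasks (descendants ++ next) next

def find_all_descendants_alt (all_tasks : List (List (String × String))) (root_task_id : String) : List String :=
  pvLoopB (all_tasks.length + 3) all_tasks [] [root_task_id]

-- ===== PRECONDITION & SPEC =====
-- bounded saturation of the child relation: all ids reachable from `start` (a property of the
-- input's parent/child graph, not a run of either program; n+2 rounds reach the fixpoint since
-- there are at most n+1 distinct reachable ids)
def pvReach (all_tasks : List (List (String × String))) (start : List String) : List String :=
  (fun s => (s ++ s.flatMap (pvChildren all_tasks)).dedup)^[all_tasks.length + 2] start

-- Pre_ excludes exactly (a) inputs where A raises KeyError (a task with a non-empty stripped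
-- parent_task_id but no "task_id" key), and (b) inputs on which A never returns (a parent/child
-- cycle reachable from the root keeps re-adding ids to A's "queue" forever).
def Pre_find_all_descendants (all_tasks : List (List (String × String))) (root_task_id : String) : Prop :=
  (∀ t ∈ all_tasks, pvParent t ≠ "" → ((PySem.Dict.mk t).get? "task_id").isSome = true) ∧
  (∀ cur ∈ pvReach all_tasks [root_task_id], cur ∉ pvReach all_tasks (pvChildren all_tasks cur))
instance (all_tasks : List (List (String × String))) (root_task_id : String) : Decidable (Pre_find_all_descendants all_tasks root_task_id) := by unfold Pre_find_all_descendants; infer_instance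

def pvWitness_find_all_descendants : (List (List (String × String))) × String :=
  ([[("parent_task_id", "r"), ("task_id", "c")]], "r")

def Spec_find_all_descendants (all_tasks : List (List (String × String))) (root_task_id : String) (out : List String) : Prop := out = find_all_descendants_alt all_tasks root_task_id
instance (all_tasks : List (List (String × String))) (root_task_id : String) (out : List String) : Decidable (Spec_find_all_descendants all_tasks root_task_id out) := by unfold Spec_find_all_descendants; infer_instance

-- ===== CLAIM (what is proved, stated in full; the proofs are below) =====
def Claim_equal_find_all_descendants : Prop := ∀ (all_tasks : List (List (String × String))) (root_task_id : String), Dom_find_all_descendants all_tasks root_task_id → Pre_find_all_descendants all_tasks root_task_id → Spec_find_all_descendants all_tasks root_task_id (find_all_descendants all_tasks root_task_id)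

-- ===== LEMMAS AND PROOFS =====

-- a guarded foldl is the foldl over the filtered list
lemma foldl_if_filter {α β : Type} (P : α → Bool) (g : β → α → β) (l : List α) (d : β) :
    l.foldl (fun d t => if P t then g d t else d) d = (l.filter P).foldl g d := by
  induction l generalizing d with
  | nil => rfl
  | cons a l ih =>
      by_cases h : P a = true <;> simp [h, ih]

-- looking `cur` up in A's children_map is exactly B's direct scan pvChildren
lemma buildMap_getD (ts : List (List (String × String))) (cur : String) :
    (pvBuildMap ts).getD cur [] = pvChildren ts cur := by
  unfold pvBuildMap
  rw [show ts.foldl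
        (fun m t => if pvParent t != "" then m.modify (pvParent t) [] (· ++ [pvKid t]) else m)
        PySem.Dict.empty
      = (ts.filter (fun t => pvParent t != "")).foldl
        (fun m t => m.modify (pvParent t) [] (· ++ [pvKid t])) PySem.Dict.empty
    from foldl_if_filter _ _ ts PySem.Dict.empty]
  have hmap : (ts.filter (fun t => pvParent t != "")).foldl
      (fun m t => m.modify (pvParent t) [] (· ++ [pvKid t])) PySem.Dict.empty
      = ((ts.filter (fun t => pvParent t != "")).map (fun t => (pvParent t, pvKid t))).foldl
        (fun m p => m.modify p.1 [] (· ++ [p.2])) PySem.Dict.empty := by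
    rw [List.foldl_map]
  rw [hmap, PySem.Dict.getD_foldl_modify_append, PySem.Dict.getD_empty, List.nil_append]
  unfold pvChildren
  rw [List.filter_map, List.map_map, List.filter_filter]
  simp [Function.comp_def, Bool.and_comm]

-- A's loop with an empty queue returns its accumulator, whatever the fuel
lemma loopA_nil (fuel : Nat) (m : PySem.Dict String (List String)) (d : List String) :
    pvLoopA fuel m d [] = d := by
  cases fuel <;> rfl

-- processing a whole level q at once: |q| dequeues append q's kids to both lists
lemma loopA_level (m : PySem.Dict String (List String)) (q : List String) :
    ∀ (r d : List String) (f : Nat),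
      pvLoopA (q.length + f) m d (q ++ r)
        = pvLoopA f m (d ++ q.flatMap (fun c => m.getD c [])) (r ++ q.flatMap (fun c => m.getD c [])) := by
  induction q with
  | nil => intro r d f; simp
  | cons c q ih =>
      intro r d f
      have hlen : (c :: q).length + f = (q.length + f) + 1 := by simp; omega
      rw [hlen]
      show pvLoopA (q.length + f + 1) m d (c :: (q ++ r)) = _
      simp only [pvLoopA]
      rw [List.append_assoc q r]
      rw [ih (r ++ m.getD c []) (d ++ m.getD c []) f]
      simp [List.append_assoc]

-- the two loops agree level for level
lemma loops_eq (ts : List (List (String × String))) :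
    ∀ (N : Nat) (d q : List String),
      pvLoopA (pvFuelA (pvBuildMap ts) q N) (pvBuildMap ts) d q = pvLoopB N ts d q := by
  intro N
  induction N with
  | zero => intro d q; rfl
  | succ N ih =>
      intro d q
      cases q with
      | nil =>
          rw [loopA_nil]; rfl
      | cons c rest =>
          have hK : (c :: rest).flatMap (fun cur => (pvBuildMap ts).getD cur [])
              = (c :: rest).flatMap (pvChildren ts) := by
            simp [buildMap_getD]
          have hstep := loopA_level (pvBuildMap ts) (c :: rest) [] d
            (pvFuelA (pvBuildMap ts)
              ((c :: rest).flatMap (fun cur => (pvBuildMap ts).getD cur [])) N)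
          simp only [List.append_nil, List.nil_append] at hstep
          show pvLoopA ((c :: rest).length + pvFuelA (pvBuildMap ts)
              ((c :: rest).flatMap (fun cur => (pvBuildMap ts).getD cur [])) N)
              (pvBuildMap ts) d (c :: rest) = _
          rw [hstep, hK, ih]
          rfl

-- ===== VERDICT (by name: the statement is the Claim_ definition above) =====
theorem find_all_descendants_spec : Claim_equal_find_all_descendants := by
  intro all_tasks root_task_id _ _
  unfold Spec_find_all_descendants find_all_descendants find_all_descendants_alt
  exact loops_eq all_tasks (all_tasks.length + 3) [] [root_task_id]
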